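-- pv_equiv track=rewrite | github.com/sesseljabs/Forritun1 | Projects/Project9/main.py | get_par_allwords
-- ===== SOURCE A (Python) =====
-- def get_par_allwords(paragraphs):
--     '''Takes in a list of the paragraphs
--         Goes through the words to edit an index of where the words have appeared
--         Returns a dictionary with the word and a list as a value
--     '''
--     pars = dict()
--
--     for i in range(len(paragraphs)):
--         for j in paragraphs[i]:
--             if j in pars: # to check if the word has already been counted in this paragraph
--                 if i+1 not in pars[j]:
--                     pars[j].append(i+1)
--             else: # otherwise add to the index
--                 pars[j] = [i+1]
--     return pars
-- ===== SOURCE B (Python) =====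
-- def get_par_allwords(paragraphs):
--     '''Takes in a list of the paragraphs
--         Goes through the words to edit an index of where the words have appeared
--         Returns a dictionary with the word and a list as a value
--     '''
--     # word-major, staged: key order = first global occurrence; each word's value is
--     # computed by one comprehension over precomputed per-paragraph membership sets
--     words = dict.fromkeys(w for par in paragraphs for w in par)
--     psets = [set(par) for par in paragraphs]
--     return {w: [i + 1 for i, s in enumerate(psets) if w in s] for w in words}
-- ===== Notes on version B (the rewrite author's own statement) =====
-- stated objective: alternative
-- what changed: B is word-major instead of paragraph-major: it first extracts the key order (first global occurrence of each word), precomputes per-paragraph membership sets, and then builds each word's paragraph-index list in one comprehension per word, instead of A's single pass that grows each word's list incrementally with an inner 'i+1 not in pars[j]' scan.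
import Mathlib
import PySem

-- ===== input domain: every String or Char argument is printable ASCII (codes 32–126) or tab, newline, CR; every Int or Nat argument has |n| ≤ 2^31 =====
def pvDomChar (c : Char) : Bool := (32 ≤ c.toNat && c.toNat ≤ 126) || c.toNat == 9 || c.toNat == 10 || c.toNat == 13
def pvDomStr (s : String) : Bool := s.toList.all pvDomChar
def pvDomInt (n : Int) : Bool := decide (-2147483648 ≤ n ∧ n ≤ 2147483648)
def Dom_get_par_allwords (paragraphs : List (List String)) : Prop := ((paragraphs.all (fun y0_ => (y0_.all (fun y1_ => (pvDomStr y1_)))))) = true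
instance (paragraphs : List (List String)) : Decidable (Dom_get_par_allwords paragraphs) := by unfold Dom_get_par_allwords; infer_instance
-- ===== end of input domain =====

-- B is word-major instead of paragraph-major: key order from one dedup pass over all words,
-- then each word's paragraph-index list is built by one scan over per-paragraph sets (objective: alternative).

-- ===== PORT A =====
def get_par_allwords (paragraphs : List (List String)) : List (String × List Int) :=
  ((PySem.List.pyRange 0 (paragraphs.length : Int) 1).foldl (fun pars i =>
      -- i ranges over range(len(paragraphs)), so paragraphs[i] never raises; pyGetD is exact here
      (PySem.List.pyGetD paragraphs i []).foldl (fun pars j =>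
        match pars.get? j with
        | some l => if (i + 1) ∈ l then pars else pars.modify j [] (fun v => v ++ [i + 1])
        | none => pars.insert j [i + 1]) pars)
    (PySem.Dict.empty : PySem.Dict String (List Int))).items

-- ===== PORT B =====
def get_par_allwords_alt (paragraphs : List (List String)) : List (String × List Int) :=
  let words := PySem.List.dedup paragraphs.flatten
  let psets := paragraphs.map PySem.Set.ofList
  words.map (fun w =>
    (w, ((PySem.List.enumerate psets 0).filter (fun p => PySem.Set.contains p.2 w)).map
          (fun p => p.1 + 1)))

-- ===== PRECONDITION & SPEC =====
def Spec_get_par_allwords (paragraphs : List (List String)) (out : List (String × List Int)) : Prop := out = get_par_allwords_alt paragraphs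
instance (paragraphs : List (List String)) (out : List (String × List Int)) : Decidable (Spec_get_par_allwords paragraphs out) := by unfold Spec_get_par_allwords; infer_instance

-- ===== CLAIM (what is proved, stated in full; the proofs are below) =====
def Claim_equal_get_par_allwords : Prop := ∀ (paragraphs : List (List String)), Dom_get_par_allwords paragraphs → Spec_get_par_allwords paragraphs (get_par_allwords paragraphs)

-- ===== LEMMAS AND PROOFS =====

-- A's inner-loop step (the body of 'for j in paragraphs[i]'), with t = i+1
def stA (t : Int) (d : PySem.Dict String (List Int)) (j : String) : PySem.Dict String (List Int) :=
  match d.get? j with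
  | some l => if t ∈ l then d else d.modify j [] (fun v => v ++ [t])
  | none => d.insert j [t]

-- A's outer-loop step over enumerated paragraphs
def stepA (d : PySem.Dict String (List Int)) (p : Int × List String) : PySem.Dict String (List Int) :=
  p.2.foldl (stA (p.1 + 1)) d

-- the canonical value of word w: the i+1 for the paragraphs (enumerated from s) containing w
def occ (xs : List (List String)) (s : Int) (w : String) : List Int :=
  ((PySem.List.enumerate xs s).filter (fun p => decide (w ∈ p.2))).map (fun p => p.1 + 1)

lemma keys_stA (t : Int) (d : PySem.Dict String (List Int)) (j : String) :
    (stA t d j).keys = PySem.Set.add d.keys j := by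
  unfold stA
  cases hd : d.get? j with
  | none =>
    have hc : d.contains j = false := by
      rw [PySem.Dict.contains_eq_isSome_get?, hd]; rfl
    have hj : j ∉ d.keys := (PySem.Dict.get?_eq_none_iff_not_mem_keys d j).1 hd
    rw [PySem.Dict.keys_insert_of_not_contains d [t] hc, PySem.Set.add_of_not_mem hj]
  | some l =>
    dsimp only
    have hj : j ∈ d.keys := by
      by_contra h
      rw [(PySem.Dict.get?_eq_none_iff_not_mem_keys d j).mpr h] at hd; cases hd
    have hc : d.contains j = true := by
      rw [PySem.Dict.contains_eq_isSome_get?, hd]; rfl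
    by_cases ht : t ∈ l
    · rw [if_pos ht, PySem.Set.add_of_mem hj]
    · rw [if_neg ht, PySem.Dict.keys_modify, PySem.Dict.keys_insert_of_contains _ _ hc,
        PySem.Set.add_of_mem hj]

lemma keys_inner (t : Int) : ∀ (ws : List String) (d : PySem.Dict String (List Int)),
    (ws.foldl (stA t) d).keys = ws.foldl PySem.Set.add d.keys := by
  intro ws
  induction ws with
  | nil => intro d; rfl
  | cons w ws ih =>
    intro d
    rw [List.foldl_cons, List.foldl_cons, ih, keys_stA]

lemma keys_outer : ∀ (xs : List (List String)) (s : Int) (d : PySem.Dict String (List Int)),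
    ((PySem.List.enumerate xs s).foldl stepA d).keys = xs.flatten.foldl PySem.Set.add d.keys := by
  intro xs
  induction xs with
  | nil => intro s d; rw [PySem.List.enumerate_nil]; rfl
  | cons x xs ih =>
    intro s d
    rw [PySem.List.enumerate_cons, List.foldl_cons, ih, List.flatten_cons, List.foldl_append]
    congr 1
    exact keys_inner (s + 1) x d

-- stA at key j leaves any other key's value untouched
lemma getD_stA_ne (t : Int) (d : PySem.Dict String (List Int)) (j w : String) (hjw : w ≠ j) :
    (stA t d j).getD w [] = d.getD w [] := by
  unfold stA
  cases hd : d.get? j with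
  | none => rw [PySem.Dict.getD_insert_of_ne d [t] [] hjw]
  | some l =>
    dsimp only
    by_cases ht : t ∈ l
    · rw [if_pos ht]
    · rw [if_neg ht, PySem.Dict.getD_modify_of_ne d [] _ hjw]

lemma inner_getD_mem (t : Int) (w : String) : ∀ (ws : List String) (d : PySem.Dict String (List Int)),
    t ∈ d.getD w [] → (ws.foldl (stA t) d).getD w [] = d.getD w [] := by
  intro ws
  induction ws with
  | nil => intro d _; rfl
  | cons j ws ih =>
    intro d hm
    rw [List.foldl_cons]
    by_cases hjw : w = j
    · subst hjw
      cases hd : d.get? w with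
      | none => rw [PySem.Dict.getD_of_get?_eq_none d [] hd] at hm; cases hm
      | some l =>
        rw [PySem.Dict.getD_of_get?_eq_some d [] hd] at hm
        have hskip : stA t d w = d := by unfold stA; rw [hd]; dsimp only; rw [if_pos hm]
        rw [hskip, ih d (by rw [PySem.Dict.getD_of_get?_eq_some d [] hd]; exact hm)]
    · rw [ih _ (by rw [getD_stA_ne t d j w hjw]; exact hm), getD_stA_ne t d j w hjw]

lemma inner_getD (t : Int) (w : String) : ∀ (ws : List String) (d : PySem.Dict String (List Int)),
    t ∉ d.getD w [] →
    (ws.foldl (stA t) d).getD w [] = d.getD w [] ++ (if w ∈ ws then [t] else []) := by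
  intro ws
  induction ws with
  | nil => intro d _; simp
  | cons j ws ih =>
    intro d hm
    rw [List.foldl_cons]
    by_cases hjw : w = j
    · subst hjw
      have hnew : (stA t d w).getD w [] = d.getD w [] ++ [t] := by
        unfold stA
        cases hd : d.get? w with
        | none =>
          rw [PySem.Dict.getD_insert_self, PySem.Dict.getD_of_get?_eq_none d [] hd]; rfl
        | some l =>
          dsimp only
          rw [PySem.Dict.getD_of_get?_eq_some d [] hd] at hm
          rw [if_neg hm, PySem.Dict.getD_modify_self, PySem.Dict.getD_of_get?_eq_some d [] hd]
      rw [inner_getD_mem t w ws _ (by rw [hnew]; simp), hnew, if_pos List.mem_cons_self]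
    · have hne : (stA t d j).getD w [] = d.getD w [] := getD_stA_ne t d j w hjw
      rw [ih _ (by rw [hne]; exact hm), hne]
      congr 1
      simp [hjw]

lemma outer_getD (w : String) : ∀ (xs : List (List String)),
    ((PySem.List.enumerate xs 0).foldl stepA (PySem.Dict.empty : PySem.Dict String (List Int))).getD w []
      = occ xs 0 w := by
  intro xs
  induction xs using List.reverseRecOn with
  | nil => rw [PySem.List.enumerate_nil]; rfl
  | append_singleton xs x ih =>
    rw [PySem.List.enumerate_append, List.foldl_append]
    have hsing : PySem.List.enumerate [x] (0 + (xs.length : Int)) = [((xs.length : Int), x)] := by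
      rw [PySem.List.enumerate_cons, PySem.List.enumerate_nil]; norm_num
    rw [hsing, List.foldl_cons, List.foldl_nil]
    have hb : ((xs.length : Int) + 1) ∉
        ((PySem.List.enumerate xs 0).foldl stepA (PySem.Dict.empty : PySem.Dict String (List Int))).getD w [] := by
      rw [ih]
      intro hmem
      unfold occ at hmem
      simp only [List.mem_map, List.mem_filter] at hmem
      obtain ⟨p, ⟨hp, _⟩, hpe⟩ := hmem
      rw [PySem.List.mem_enumerate_iff] at hp
      obtain ⟨k, hk, rfl⟩ := hp
      simp only [zero_add] at hpe
      omega
    rw [show stepA ((PySem.List.enumerate xs 0).foldl stepA PySem.Dict.empty) ((xs.length : Int), x)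
          = x.foldl (stA ((xs.length : Int) + 1)) ((PySem.List.enumerate xs 0).foldl stepA PySem.Dict.empty)
        from rfl]
    rw [inner_getD _ w x _ hb, ih]
    unfold occ
    rw [PySem.List.enumerate_append, List.filter_append, List.map_append, hsing]
    congr 1
    by_cases hwx : w ∈ x
    · simp [hwx]
    · simp [hwx]

-- B's per-word value over membership sets is occ
lemma alt_value (w : String) : ∀ (xs : List (List String)) (s : Int),
    ((PySem.List.enumerate (xs.map PySem.Set.ofList) s).filter (fun p => PySem.Set.contains p.2 w)).map
        (fun p => p.1 + 1) = occ xs s w := by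
  intro xs
  induction xs with
  | nil => intro s; rfl
  | cons x xs ih =>
    intro s
    have hc : PySem.Set.contains (PySem.Set.ofList x) w = decide (w ∈ x) := by
      by_cases h : w ∈ x
      · simp [PySem.Set.mem_ofList, h]
      · simp [PySem.Set.mem_ofList, h]
    unfold occ
    rw [List.map_cons, PySem.List.enumerate_cons, PySem.List.enumerate_cons,
      List.filter_cons, List.filter_cons]
    by_cases h : w ∈ x
    · simp only [hc, h, decide_true, if_true, List.map_cons]
      rw [ih (s + 1)]; rfl
    · simp only [hc, h, decide_false, Bool.false_eq_true, if_false]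
      rw [ih (s + 1)]
      rfl

-- ===== VERDICT (by name: the statement is the Claim_ definition above) =====
theorem get_par_allwords_spec : Claim_equal_get_par_allwords := by
  intro paragraphs _
  unfold Spec_get_par_allwords get_par_allwords get_par_allwords_alt
  have hA : (PySem.List.pyRange 0 (paragraphs.length : Int) 1).foldl (fun pars i =>
      (PySem.List.pyGetD paragraphs i []).foldl (fun pars j =>
        match pars.get? j with
        | some l => if (i + 1) ∈ l then pars else pars.modify j [] (fun v => v ++ [i + 1])
        | none => pars.insert j [i + 1]) pars)
      (PySem.Dict.empty : PySem.Dict String (List Int))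
      = (PySem.List.enumerate paragraphs 0).foldl stepA
        (PySem.Dict.empty : PySem.Dict String (List Int)) := by
    rw [PySem.List.enumerate_eq_map_pyRange paragraphs ([] : List String), List.foldl_map]
    rfl
  rw [hA]
  have hkeys : ((PySem.List.enumerate paragraphs 0).foldl stepA
      (PySem.Dict.empty : PySem.Dict String (List Int))).keys
      = PySem.List.dedup paragraphs.flatten := by
    rw [keys_outer paragraphs 0 PySem.Dict.empty, PySem.List.dedup_eq_ofList,
      PySem.Set.ofList_eq_foldl]
    rfl
  have hnd : ((PySem.List.enumerate paragraphs 0).foldl stepA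
      (PySem.Dict.empty : PySem.Dict String (List Int))).keys.Nodup := by
    rw [hkeys, PySem.List.dedup_eq_ofList]
    exact PySem.Set.nodup_ofList _
  rw [PySem.Dict.items_eq_map_keys _ hnd ([] : List Int), hkeys]
  apply List.map_congr_left
  intro w _
  rw [outer_getD w paragraphs, alt_value w paragraphs 0]
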